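-- pv_equiv track=rewrite | github.com/THEW00LY/P.I.R-IMAGE-REDUCTION | median-cut.py | compute_range
-- ===== SOURCE A (Python) =====
-- RED = 0
--
-- GREEN = 1
--
-- BLUE = 2
--
-- def compute_range(box):
--     reds = [p[0][RED] for p in box]
--     greens = [p[0][GREEN] for p in box]
--     blues = [p[0][BLUE] for p in box]
--
--     range_r = max(reds) - min(reds)
--     range_g = max(greens) - min(greens)
--     range_b = max(blues) - min(blues)
--
--     biggest_range = max(range_r, range_g, range_b)
--
--     return biggest_range
-- ===== SOURCE B (Python) =====
-- def compute_range(box):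
--     (min_r, min_g, min_b), _ = box[0]
--     max_r, max_g, max_b = min_r, min_g, min_b
--     for (r, g, b), _ in box[1:]:
--         min_r = min(min_r, r); max_r = max(max_r, r)
--         min_g = min(min_g, g); max_g = max(max_g, g)
--         min_b = min(min_b, b); max_b = max(max_b, b)
--     return max(max_r - min_r, max_g - min_g, max_b - min_b)
-- ===== Notes on version B (the rewrite author's own statement) =====
-- stated objective: alternative
-- what changed: Replaces building three channel lists and scanning each twice with max()/min() by one single-pass loop maintaining six running min/max accumulators (no intermediate lists).
import Mathlib
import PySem

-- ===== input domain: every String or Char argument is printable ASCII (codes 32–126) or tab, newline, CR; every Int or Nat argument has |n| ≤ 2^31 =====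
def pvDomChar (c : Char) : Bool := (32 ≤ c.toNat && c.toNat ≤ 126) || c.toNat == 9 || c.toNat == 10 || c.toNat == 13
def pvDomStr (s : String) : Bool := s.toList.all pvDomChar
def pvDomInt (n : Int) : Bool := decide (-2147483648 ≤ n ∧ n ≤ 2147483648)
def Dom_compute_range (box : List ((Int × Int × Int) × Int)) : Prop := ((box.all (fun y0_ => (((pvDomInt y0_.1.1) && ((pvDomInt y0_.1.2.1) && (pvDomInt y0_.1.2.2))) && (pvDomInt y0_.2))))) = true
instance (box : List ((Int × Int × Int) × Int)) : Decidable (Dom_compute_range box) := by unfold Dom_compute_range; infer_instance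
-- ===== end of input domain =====

-- B replaces three built channel lists scanned twice each by one loop keeping six running min/max; return value equivalence on nonempty boxes.

-- ===== PORT A =====
def compute_range (box : List ((Int × Int × Int) × Int)) : Int :=
  let reds := box.map (fun p => p.1.1)
  let greens := box.map (fun p => p.1.2.1)
  let blues := box.map (fun p => p.1.2.2)
  let range_r := (PySem.List.max? reds (fun x => x)).getD 0 - (PySem.List.min? reds (fun x => x)).getD 0
  let range_g := (PySem.List.max? greens (fun x => x)).getD 0 - (PySem.List.min? greens (fun x => x)).getD 0
  let range_b := (PySem.List.max? blues (fun x => x)).getD 0 - (PySem.List.min? blues (fun x => x)).getD 0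
  max range_r (max range_g range_b)

-- ===== PORT B =====
-- the accumulating loop of Source B: state = (min_r, max_r, min_g, max_g, min_b, max_b)
def crLoop : List ((Int × Int × Int) × Int) → Int × Int × Int × Int × Int × Int → Int × Int × Int × Int × Int × Int
  | [], st => st
  | p :: rest, (mr, Mr, mg, Mg, mb, Mb) =>
      crLoop rest (min mr p.1.1, max Mr p.1.1, min mg p.1.2.1, max Mg p.1.2.1, min mb p.1.2.2, max Mb p.1.2.2)

def compute_range_alt (box : List ((Int × Int × Int) × Int)) : Int :=
  match box with
  | [] => 0   -- unreachable under Pre_: Python B raises IndexError on box[0]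
  | p :: rest =>
    let (mr, Mr, mg, Mg, mb, Mb) := crLoop rest (p.1.1, p.1.1, p.1.2.1, p.1.2.1, p.1.2.2, p.1.2.2)
    max (Mr - mr) (max (Mg - mg) (Mb - mb))

-- ===== PRECONDITION & SPEC =====
-- Pre_ excludes the empty box, on which A raises ValueError (max of empty sequence) and B raises IndexError.
def Pre_compute_range (box : List ((Int × Int × Int) × Int)) : Prop := box ≠ []
instance (box : List ((Int × Int × Int) × Int)) : Decidable (Pre_compute_range box) := by unfold Pre_compute_range; infer_instance
def pvWitness_compute_range : (List ((Int × Int × Int) × Int)) := [((1, 2, 3), 0), ((5, 0, 4), 1)]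

def Spec_compute_range (box : List ((Int × Int × Int) × Int)) (out : Int) : Prop := out = compute_range_alt box
instance (box : List ((Int × Int × Int) × Int)) (out : Int) : Decidable (Spec_compute_range box out) := by unfold Spec_compute_range; infer_instance

-- ===== CLAIM (what is proved, stated in full; the proofs are below) =====
def Claim_equal_compute_range : Prop := ∀ (box : List ((Int × Int × Int) × Int)), Dom_compute_range box → Pre_compute_range box → Spec_compute_range box (compute_range box)

-- ===== LEMMAS AND PROOFS =====
theorem crLoop_eq (rest : List ((Int × Int × Int) × Int)) (mr Mr mg Mg mb Mb : Int) :
    crLoop rest (mr, Mr, mg, Mg, mb, Mb) =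
      ((rest.map (fun p => p.1.1)).foldl min mr,
       (rest.map (fun p => p.1.1)).foldl max Mr,
       (rest.map (fun p => p.1.2.1)).foldl min mg,
       (rest.map (fun p => p.1.2.1)).foldl max Mg,
       (rest.map (fun p => p.1.2.2)).foldl min mb,
       (rest.map (fun p => p.1.2.2)).foldl max Mb) := by
  induction rest generalizing mr Mr mg Mg mb Mb with
  | nil => rfl
  | cons p t ih => simp [crLoop, ih]

-- ===== VERDICT (by name: the statement is the Claim_ definition above) =====
theorem compute_range_spec : Claim_equal_compute_range := by
  intro box _ hpre
  match box with
  | [] => exact absurd rfl hpre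
  | p :: rest =>
    show compute_range (p :: rest) = compute_range_alt (p :: rest)
    simp [compute_range, compute_range_alt, crLoop_eq,
      PySem.List.max?_id_cons, PySem.List.min?_id_cons]
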